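-- pv_equiv track=rewrite | github.com/Maccy-Z/psychic-waffle | pde/findiff/findiff_coeff.py | gen_multi_idx_tuple
-- ===== SOURCE A (Python) =====
-- def gen_multi_idx_tuple(m):
--     """
--     Indicies in tuple form for dict indexing
--     """
--     indices = []
--     for total_degree in range(m + 1):
--         for alpha_x in range(total_degree + 1):
--             alpha_y = total_degree - alpha_x
--             indices.append((alpha_x, alpha_y))
--
--     indices = sorted(indices, key=lambda x: (x[0] + x[1], -x[0]))
--     return indices
-- ===== SOURCE B (Python) =====
-- def gen_multi_idx_tuple(m):
--     """
--     Indicies in tuple form for dict indexing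
--     """
--     if m < 0:
--         return []
--     indices = []
--     x, y = 0, 0
--     while True:
--         indices.append((x, y))
--         if x == 0:
--             if y == m:
--                 return indices
--             x, y = y + 1, 0
--         else:
--             x, y = x - 1, y + 1
-- ===== Notes on version B (the rewrite author's own statement) =====
-- stated objective: faster
-- what changed: B replaces A's nested generation loops plus final sort by a single while-loop state machine over one (x, y) pair that emits each tuple directly in the final sorted order (x descending within each total degree), so the sort of the Theta(m^2) tuples disappears.
import Mathlib
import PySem

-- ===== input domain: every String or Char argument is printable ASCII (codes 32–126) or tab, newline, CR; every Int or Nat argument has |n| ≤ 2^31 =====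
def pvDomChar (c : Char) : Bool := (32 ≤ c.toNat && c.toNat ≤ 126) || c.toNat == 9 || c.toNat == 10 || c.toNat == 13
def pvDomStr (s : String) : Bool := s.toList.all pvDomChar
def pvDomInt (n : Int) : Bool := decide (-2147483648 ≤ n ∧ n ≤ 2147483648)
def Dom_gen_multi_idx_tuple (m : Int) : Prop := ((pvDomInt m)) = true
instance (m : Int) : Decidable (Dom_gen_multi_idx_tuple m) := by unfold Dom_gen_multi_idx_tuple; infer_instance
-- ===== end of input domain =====

-- B replaces A's generate-then-sort with a single while-loop state machine over one (x, y) pair that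
-- emits each tuple directly in the final sorted order, so A's sort of the Θ(m²) tuples disappears
-- (objective: faster; measured).

-- ===== PORT A =====
-- A's tuples (alpha_x, alpha_y) are ported as two-element lists [alpha_x, alpha_y] (the required output
-- type is List (List Int)); the sort key x[0] / x[1] is ported with List.getD, exact here because every
-- element of `indices` has length 2.
def gen_multi_idx_tuple (m : Int) : List (List Int) :=
  let indices : List (List Int) :=
    (PySem.List.pyRange 0 (m + 1)).foldl (fun acc total_degree =>
      (PySem.List.pyRange 0 (total_degree + 1)).foldl (fun acc2 alpha_x =>
        acc2 ++ [[alpha_x, total_degree - alpha_x]]) acc) []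
  PySem.List.sorted2 indices (fun x => x.getD 0 0 + x.getD 1 0) (fun x => -(x.getD 0 0))

-- ===== PORT B =====
-- B's `while True` loop, step for step; the Nat argument is pure fuel (a totality guard): the loop
-- terminates by returning `indices` when x = 0 ∧ y = m, and (m+1)*(m+2) fuel is always enough.
def pvAltLoop (m : Int) (x y : Int) : Nat → List (List Int)
  | 0 => []
  | Nat.succ f =>
    [x, y] :: (if x = 0 then (if y = m then [] else pvAltLoop m (y + 1) 0 f)
               else pvAltLoop m (x - 1) (y + 1) f)

def gen_multi_idx_tuple_alt (m : Int) : List (List Int) :=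
  if m < 0 then [] else pvAltLoop m 0 0 ((m + 1) * (m + 2)).toNat

-- ===== PRECONDITION & SPEC =====
def Spec_gen_multi_idx_tuple (m : Int) (out : List (List Int)) : Prop := out = gen_multi_idx_tuple_alt m
instance (m : Int) (out : List (List Int)) : Decidable (Spec_gen_multi_idx_tuple m out) := by unfold Spec_gen_multi_idx_tuple; infer_instance

-- ===== CLAIM (what is proved, stated in full; the proofs are below) =====
def Claim_equal_gen_multi_idx_tuple : Prop := ∀ (m : Int), Dom_gen_multi_idx_tuple m → Spec_gen_multi_idx_tuple m (gen_multi_idx_tuple m)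

-- ===== LEMMAS AND PROOFS =====

-- the row of total degree d, in A's (alpha_x ascending) and B's (alpha_x descending) emission order
def pvRowA (d : Nat) : List (List Int) := (List.range (d + 1)).map (fun a : Nat => [(a : Int), (d : Int) - (a : Int)])
def pvRowB (d : Nat) : List (List Int) := (List.range (d + 1)).map (fun a : Nat => [(d : Int) - (a : Int), (a : Int)])

-- A's tuple sort key (x[0]+x[1], -x[0]), as a single lexicographic key
def pvKey (x : List Int) : Int ×ₗ Int := toLex (x.getD 0 0 + x.getD 1 0, -(x.getD 0 0))

-- exact fuel needed by pvAltLoop starting at row d with r further rows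
def pvFuelRows : Nat → Nat → Nat
  | d, 0 => d + 1
  | d, Nat.succ r => d + 1 + pvFuelRows (d + 1) r

-- Python's two-component tuple key compares lexicographically
theorem pv_sorted2_eq_sorted_lex (xs : List (List Int)) (k1 k2 : List Int → Int) :
    PySem.List.sorted2 xs k1 k2 = PySem.List.sorted xs (fun x => (toLex (k1 x, k2 x) : Int ×ₗ Int)) := by
  have h : (fun a b => decide (k1 a < k1 b) || (!decide (k1 b < k1 a) && decide (k2 a < k2 b)))
      = (fun a b => decide ((toLex (k1 a, k2 a) : Int ×ₗ Int) < toLex (k1 b, k2 b))) := by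
    funext a b
    by_cases h1 : k1 a < k1 b <;> by_cases h2 : k1 b < k1 a <;> by_cases h3 : k2 a < k2 b <;>
      simp [Prod.Lex.toLex_lt_toLex, h1, h2, h3] <;> omega
  simp [PySem.List.sorted2, PySem.List.sorted, h]

theorem pv_empty_of_nonpos (b : Int) (h : b ≤ 0) : PySem.List.pyRange 0 b 1 = [] := by
  rw [PySem.List.pyRange_of_pos 0 b one_pos]
  simp [if_neg (by omega : ¬ (0:Int) < b)]

theorem pv_innerA (d : Nat) (acc : List (List Int)) :
    (PySem.List.pyRange 0 ((d : Int) + 1)).foldl (fun acc2 ax => acc2 ++ [[ax, (d : Int) - ax]]) acc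
      = acc ++ pvRowA d := by
  have h : ((d : Int) + 1) = ((d + 1 : Nat) : Int) := by push_cast; ring
  rw [h, PySem.List.pyRange_zero_natCast, List.foldl_map, PySem.List.foldl_append_singleton_eq_map]
  simp [pvRowA]

theorem pv_A_eq (m : Int) (hm : 0 ≤ m) :
    gen_multi_idx_tuple m
      = PySem.List.sorted2 ((List.range (m + 1).toNat).flatMap pvRowA)
          (fun x => x.getD 0 0 + x.getD 1 0) (fun x => -(x.getD 0 0)) := by
  unfold gen_multi_idx_tuple
  have h : (m + 1) = (((m + 1).toNat : Nat) : Int) := by omega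
  rw [h, PySem.List.pyRange_zero_natCast, List.foldl_map]
  rw [PySem.List.foldl_congr_mem (List.range (m + 1).toNat) _
    (fun acc (d : Nat) => acc ++ pvRowA d) [] (fun acc d _ => pv_innerA d acc)]
  rw [PySem.List.foldl_append_eq_flatMap, Int.toNat_natCast]
  rfl

-- one row of B's loop: from (a, y) it emits [a,y], [a-1,y+1], …, [0,y+a], then stops or starts row y+a+1
theorem pv_row_step (m : Int) (a : Nat) : ∀ (y : Int) (f : Nat),
    pvAltLoop m (a : Int) y (a + 1 + f)
      = ((List.range (a + 1)).map (fun i : Nat => [(a : Int) - i, y + i]))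
        ++ (if y + (a : Int) = m then [] else pvAltLoop m (y + a + 1) 0 f) := by
  induction a with
  | zero =>
    intro y f
    have h1 : 0 + 1 + f = Nat.succ f := by omega
    rw [h1]
    simp [pvAltLoop]
  | succ a ih =>
    intro y f
    have hx : ((a : Int) + 1) ≠ 0 := by omega
    have hs : ((a.succ : Nat) : Int) = (a : Int) + 1 := by push_cast; ring
    have h1 : a.succ + 1 + f = Nat.succ (a + 1 + f) := by omega
    rw [h1, hs, pvAltLoop, if_neg hx]
    have h2 : (a : Int) + 1 - 1 = (a : Int) := by ring
    rw [h2, ih (y + 1) f]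
    rw [show y + 1 + (a : Int) = y + ((a : Int) + 1) from by ring]
    have hmap : List.map (fun i : Nat => [(a : Int) + 1 - ↑i, y + ↑i]) (List.range (a + 1 + 1))
        = [(a : Int) + 1, y] :: List.map (fun i : Nat => [(a : Int) - ↑i, y + 1 + ↑i]) (List.range (a + 1)) := by
      rw [List.range_succ_eq_map, List.map_cons, List.map_map]
      simp only [Nat.cast_zero, sub_zero, add_zero]
      congr 1
      apply List.map_congr_left
      intro i _
      simp only [Function.comp_apply, List.cons.injEq, and_true]
      exact ⟨by push_cast; ring, by push_cast; ring⟩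
    rw [hmap]
    simp only [List.cons_append]

-- the fuel bookkeeping: pvFuelRows is the triangular-number difference
theorem pv_fuelRows_eq (r : Nat) : ∀ d : Nat,
    2 * pvFuelRows d r + d * (d + 1) = (d + r + 1) * (d + r + 2) := by
  induction r with
  | zero => intro d; simp [pvFuelRows]; ring
  | succ r ih =>
    intro d
    have h := ih (d + 1)
    simp only [pvFuelRows]
    nlinarith [h]

-- the whole loop from (d, 0): emits rows d, d+1, …, d+r (= m) in order
theorem pv_rows (m : Int) : ∀ (r d : Nat) (f : Nat), ((d : Int) + r = m) →
    pvAltLoop m (d : Int) 0 (pvFuelRows d r + f)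
      = (List.range' d (r + 1)).flatMap pvRowB := by
  intro r
  induction r with
  | zero =>
    intro d f hd
    simp only [pvFuelRows]
    rw [pv_row_step m d 0 f]
    have : (0 : Int) + (d : Int) = m := by omega
    rw [if_pos this]
    simp [pvRowB, List.range'_one]
  | succ r ih =>
    intro d f hd
    have hfuel : pvFuelRows d (r + 1) + f = d + 1 + (pvFuelRows (d + 1) r + f) := by
      simp [pvFuelRows]; omega
    rw [hfuel, pv_row_step m d 0 (pvFuelRows (d + 1) r + f)]
    have hne : ¬ ((0:Int) + (d:Int) = m) := by push_cast at hd ⊢; omega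
    rw [if_neg hne]
    have hcast : (0 : Int) + (d : Int) + 1 = (((d + 1 : Nat)) : Int) := by push_cast; ring
    rw [hcast, ih (d + 1) f (by push_cast at hd ⊢; omega)]
    rw [List.range'_succ, List.flatMap_cons]
    congr 1
    unfold pvRowB
    apply List.map_congr_left
    intro i _
    simp

theorem pv_B_eq (m : Int) (hm : 0 ≤ m) :
    gen_multi_idx_tuple_alt m = (List.range (m + 1).toNat).flatMap pvRowB := by
  unfold gen_multi_idx_tuple_alt
  rw [if_neg (by omega : ¬ m < 0)]
  have hmM : m = (m.toNat : Int) := by omega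
  have hfuel : ((m + 1) * (m + 2)).toNat = pvFuelRows 0 m.toNat + pvFuelRows 0 m.toNat := by
    have h := pv_fuelRows_eq m.toNat 0
    have h2 : (m + 1) * (m + 2) = (((m.toNat + 1) * (m.toNat + 2) : Nat) : Int) := by
      push_cast [Int.toNat_of_nonneg hm]; ring
    rw [h2, Int.toNat_natCast]
    norm_num at h
    rw [← h]; omega
  rw [hfuel]
  have h := pv_rows m m.toNat 0 (pvFuelRows 0 m.toNat) (by omega)
  simp only [Nat.cast_zero] at h
  rw [h]
  have hn : (m + 1).toNat = m.toNat + 1 := by omega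
  rw [hn, List.range_eq_range']

theorem pv_perm_map_sub (n : Nat) : ((List.range n).map (fun i => n - 1 - i)).Perm (List.range n) := by
  apply List.perm_of_nodup_nodup_toFinset_eq
  · exact List.Nodup.map_on (fun x hx y hy h => by
      simp only [List.mem_range] at hx hy; omega) List.nodup_range
  · exact List.nodup_range
  · ext x
    simp only [List.mem_toFinset, List.mem_map, List.mem_range]
    constructor
    · rintro ⟨i, hi, rfl⟩; omega
    · intro hx; exact ⟨n - 1 - x, by omega, by omega⟩

theorem pv_rowB_perm (d : Nat) : (pvRowB d).Perm (pvRowA d) := by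
  have h : pvRowB d = ((List.range (d + 1)).map (fun i => d + 1 - 1 - i)).map
      (fun a : Nat => [(a : Int), (d : Int) - (a : Int)]) := by
    rw [List.map_map]
    apply List.map_congr_left
    intro a ha
    simp only [List.mem_range] at ha
    simp only [Function.comp_apply, List.cons.injEq, and_true]
    omega
  rw [h]
  exact (pv_perm_map_sub (d + 1)).map _

theorem pv_pairwiseB (n : Nat) :
    List.Pairwise (fun a b => pvKey a < pvKey b) ((List.range n).flatMap pvRowB) := by
  induction n with
  | zero => simp
  | succ k ih =>
    rw [List.range_succ, List.flatMap_append, List.pairwise_append]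
    refine ⟨ih, ?_, ?_⟩
    · simp only [List.flatMap_cons, List.flatMap_nil, List.append_nil, pvRowB]
      apply List.Pairwise.map _ ?_ (List.pairwise_lt_range (n := k + 1))
      intro a b hab
      simp only [pvKey, List.getD_cons_zero, List.getD_cons_succ, Prod.Lex.toLex_lt_toLex]
      right
      constructor <;> [ring; omega]
    · intro x hx y hy
      simp only [List.mem_flatMap, List.mem_range, List.flatMap_cons, List.flatMap_nil,
        List.append_nil, pvRowB, List.mem_map] at hx hy
      obtain ⟨d, hd, a, ha, rfl⟩ := hx
      obtain ⟨b, hb, rfl⟩ := hy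
      simp only [pvKey, List.getD_cons_zero, List.getD_cons_succ, Prod.Lex.toLex_lt_toLex]
      left
      have h1 : ((d:Int) - a) + a = d := by ring
      have h2 : ((k:Int) - b) + b = k := by ring
      rw [h1, h2]
      exact_mod_cast hd

-- ===== VERDICT (by name: the statement is the Claim_ definition above) =====
theorem gen_multi_idx_tuple_spec : Claim_equal_gen_multi_idx_tuple := by
  intro m _
  unfold Spec_gen_multi_idx_tuple
  by_cases hm : 0 ≤ m
  · rw [pv_A_eq m hm, pv_B_eq m hm, pv_sorted2_eq_sorted_lex]
    apply PySem.List.sorted_eq_of_perm_of_pairwise_lt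
    · exact List.Perm.flatMap_left _ (fun d _ => pv_rowB_perm d)
    · exact pv_pairwiseB _
  · unfold gen_multi_idx_tuple gen_multi_idx_tuple_alt
    rw [pv_empty_of_nonpos (m + 1) (by omega), if_pos (by omega : m < 0)]
    rfl
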